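-- pv_equiv track=rewrite | github.com/SSCT-Lab/loghound | compare.py | classify_by_system
-- ===== SOURCE A (Python) =====
-- def classify_by_system(titles):
--     """
--     根据title开头将其分类到不同系统类型
--
--     返回:
--     分类字典，键为系统类型，值为对应title列表
--     """
--     systems = {
--         'Cassandra': [],
--         'HDFS': [],
--         'MAPREDUCE': [],
--         'ZooKeeper': [],
--         'HBase': [],
--     }
--
--     for title in titles:
--         if title.startswith('CASSANDRA') or title.startswith('Cassandra'):
--             systems['Cassandra'].append(title)
--         elif title.startswith('HDFS'):
--             systems['HDFS'].append(title)
--         elif title.startswith('MAPREDUCE') or title.startswith('MAPREDUCE'):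
--             systems['MAPREDUCE'].append(title)
--         elif title.startswith('ZOOKEEPER') or title.startswith('ZooKeeper'):
--             systems['ZooKeeper'].append(title)
--         elif title.startswith('HBASE') or title.startswith('HBase'):
--             systems['HBase'].append(title)
--
--     return systems
-- ===== SOURCE B (Python) =====
-- PREFIX_TABLE = [
--     ('Cassandra', ('CASSANDRA', 'Cassandra')),
--     ('HDFS', ('HDFS',)),
--     ('MAPREDUCE', ('MAPREDUCE',)),
--     ('ZooKeeper', ('ZOOKEEPER', 'ZooKeeper')),
--     ('HBase', ('HBASE', 'HBase')),
-- ]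
--
--
-- def classify_by_system(titles):
--     # One filtering pass per system; the prefix sets are pairwise disjoint,
--     # so per-bucket filtering selects exactly the titles A's elif chain does.
--     return {key: [t for t in titles if t.startswith(prefixes)]
--             for key, prefixes in PREFIX_TABLE}
-- ===== Notes on version B (the rewrite author's own statement) =====
-- stated objective: idiomatic
-- what changed: Replaced the per-title elif dispatch chain with a data-driven prefix table and one dict comprehension that builds each bucket by a per-system filtering pass (valid because the prefix sets are pairwise disjoint).
import Mathlib
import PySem

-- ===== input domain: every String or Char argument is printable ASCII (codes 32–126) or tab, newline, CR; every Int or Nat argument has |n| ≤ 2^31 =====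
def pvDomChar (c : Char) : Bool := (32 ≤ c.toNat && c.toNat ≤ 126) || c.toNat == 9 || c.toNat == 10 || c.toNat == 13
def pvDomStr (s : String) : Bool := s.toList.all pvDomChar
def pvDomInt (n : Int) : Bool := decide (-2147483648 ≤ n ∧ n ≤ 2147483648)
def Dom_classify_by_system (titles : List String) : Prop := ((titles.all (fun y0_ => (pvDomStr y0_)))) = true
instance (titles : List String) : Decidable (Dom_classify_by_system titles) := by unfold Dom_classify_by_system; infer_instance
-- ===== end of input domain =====

-- B replaces A's per-title elif dispatch by a prefix table and one filtering pass per system (idiomatic, data-driven).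

-- ===== PORT A =====
def classifyStepA (d : PySem.Dict String (List String)) (title : String) : PySem.Dict String (List String) :=
  if PySem.Str.startswith title "CASSANDRA" || PySem.Str.startswith title "Cassandra" then
    d.modify "Cassandra" [] (· ++ [title])
  else if PySem.Str.startswith title "HDFS" then
    d.modify "HDFS" [] (· ++ [title])
  else if PySem.Str.startswith title "MAPREDUCE" || PySem.Str.startswith title "MAPREDUCE" then
    d.modify "MAPREDUCE" [] (· ++ [title])
  else if PySem.Str.startswith title "ZOOKEEPER" || PySem.Str.startswith title "ZooKeeper" then
    d.modify "ZooKeeper" [] (· ++ [title])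
  else if PySem.Str.startswith title "HBASE" || PySem.Str.startswith title "HBase" then
    d.modify "HBase" [] (· ++ [title])
  else d

def classify_by_system (titles : List String) : List (String × List String) :=
  (titles.foldl classifyStepA
    (PySem.Dict.ofList [("Cassandra", []), ("HDFS", []), ("MAPREDUCE", []), ("ZooKeeper", []), ("HBase", [])])).items

-- ===== PORT B =====
def prefixTable : List (String × List String) :=
  [("Cassandra", ["CASSANDRA", "Cassandra"]),
   ("HDFS", ["HDFS"]),
   ("MAPREDUCE", ["MAPREDUCE"]),
   ("ZooKeeper", ["ZOOKEEPER", "ZooKeeper"]),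
   ("HBase", ["HBASE", "HBase"])]

def classify_by_system_alt (titles : List String) : List (String × List String) :=
  prefixTable.map (fun kp =>
    (kp.1, titles.filter (fun t => kp.2.any (fun p => PySem.Str.startswith t p))))

-- ===== PRECONDITION & SPEC =====
def Spec_classify_by_system (titles : List String) (out : List (String × List String)) : Prop := out = classify_by_system_alt titles
instance (titles : List String) (out : List (String × List String)) : Decidable (Spec_classify_by_system titles out) := by unfold Spec_classify_by_system; infer_instance

-- ===== CLAIM (what is proved, stated in full; the proofs are below) =====
def Claim_equal_classify_by_system : Prop := ∀ (titles : List String), Dom_classify_by_system titles → Spec_classify_by_system titles (classify_by_system titles)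

-- ===== LEMMAS AND PROOFS =====

-- two string literals neither of which is a prefix of the other cannot both be prefixes of t
theorem sw_disjoint (t p q : String)
    (h1 : ¬ p.toList <+: q.toList) (h2 : ¬ q.toList <+: p.toList)
    (hp : PySem.Str.startswith t p = true) : PySem.Str.startswith t q = false := by
  by_contra h
  have hq : PySem.Str.startswith t q = true := by
    cases hqq : PySem.Str.startswith t q with
    | true => rfl
    | false => exact absurd hqq h
  rw [PySem.Str.startswith_eq, PySem.Chars.startswith_iff] at hp hq
  rcases List.prefix_or_prefix_of_prefix hp hq with h' | h'
  · exact h1 h'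
  · exact h2 h'

def fC (t : String) : Bool := (["CASSANDRA", "Cassandra"] : List String).any (fun p => PySem.Str.startswith t p)
def fH (t : String) : Bool := (["HDFS"] : List String).any (fun p => PySem.Str.startswith t p)
def fM (t : String) : Bool := (["MAPREDUCE"] : List String).any (fun p => PySem.Str.startswith t p)
def fZ (t : String) : Bool := (["ZOOKEEPER", "ZooKeeper"] : List String).any (fun p => PySem.Str.startswith t p)
def fB (t : String) : Bool := (["HBASE", "HBase"] : List String).any (fun p => PySem.Str.startswith t p)


theorem excl_C (t : String)
    (h : (PySem.Str.startswith t "CASSANDRA" || PySem.Str.startswith t "Cassandra") = true) :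
    fH t = false ∧ fM t = false ∧ fZ t = false ∧ fB t = false := by
  simp only [fH, fM, fZ, fB, List.any_cons, List.any_nil, Bool.or_false, Bool.or_eq_false_iff]
  simp only [Bool.or_eq_true] at h
  rcases h with hp | hp <;>
    exact ⟨sw_disjoint t _ _ (by decide) (by decide) hp,
           sw_disjoint t _ _ (by decide) (by decide) hp,
           ⟨sw_disjoint t _ _ (by decide) (by decide) hp, sw_disjoint t _ _ (by decide) (by decide) hp⟩,
           ⟨sw_disjoint t _ _ (by decide) (by decide) hp, sw_disjoint t _ _ (by decide) (by decide) hp⟩⟩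

theorem excl_H (t : String) (h : PySem.Str.startswith t "HDFS" = true) :
    fM t = false ∧ fZ t = false ∧ fB t = false := by
  simp only [fM, fZ, fB, List.any_cons, List.any_nil, Bool.or_false, Bool.or_eq_false_iff]
  exact ⟨sw_disjoint t _ _ (by decide) (by decide) h,
         ⟨sw_disjoint t _ _ (by decide) (by decide) h, sw_disjoint t _ _ (by decide) (by decide) h⟩,
         ⟨sw_disjoint t _ _ (by decide) (by decide) h, sw_disjoint t _ _ (by decide) (by decide) h⟩⟩

theorem excl_M (t : String) (h : PySem.Str.startswith t "MAPREDUCE" = true) :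
    fZ t = false ∧ fB t = false := by
  simp only [fZ, fB, List.any_cons, List.any_nil, Bool.or_false, Bool.or_eq_false_iff]
  exact ⟨⟨sw_disjoint t _ _ (by decide) (by decide) h, sw_disjoint t _ _ (by decide) (by decide) h⟩,
         ⟨sw_disjoint t _ _ (by decide) (by decide) h, sw_disjoint t _ _ (by decide) (by decide) h⟩⟩

theorem excl_Z (t : String)
    (h : (PySem.Str.startswith t "ZOOKEEPER" || PySem.Str.startswith t "ZooKeeper") = true) :
    fB t = false := by
  simp only [fB, List.any_cons, List.any_nil, Bool.or_false, Bool.or_eq_false_iff]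
  simp only [Bool.or_eq_true] at h
  rcases h with hp | hp <;>
    exact ⟨sw_disjoint t _ _ (by decide) (by decide) hp, sw_disjoint t _ _ (by decide) (by decide) hp⟩

theorem classify_main (ts : List String) :
    ∀ a b c d e : List String,
    (ts.foldl classifyStepA
      (PySem.Dict.mk [("Cassandra", a), ("HDFS", b), ("MAPREDUCE", c), ("ZooKeeper", d), ("HBase", e)])).items
    = [("Cassandra", a ++ ts.filter fC), ("HDFS", b ++ ts.filter fH),
       ("MAPREDUCE", c ++ ts.filter fM), ("ZooKeeper", d ++ ts.filter fZ),
       ("HBase", e ++ ts.filter fB)] := by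
  induction ts with
  | nil => intro a b c d e; simp
  | cons t ts ih =>
    intro a b c d e
    simp only [List.foldl_cons, classifyStepA]
    split_ifs with h1 h2 h3 h4 h5
    · have hC : fC t = true := by simpa [fC] using h1
      obtain ⟨eH, eM, eZ, eB⟩ := excl_C t h1
      rw [show (PySem.Dict.mk [("Cassandra", a), ("HDFS", b), ("MAPREDUCE", c), ("ZooKeeper", d), ("HBase", e)]).modify "Cassandra" [] (· ++ [t])
            = PySem.Dict.mk [("Cassandra", a ++ [t]), ("HDFS", b), ("MAPREDUCE", c), ("ZooKeeper", d), ("HBase", e)] from by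
          simp [PySem.Dict.modify, PySem.Dict.getD, PySem.Dict.get?_mk_cons, PySem.Dict.insert], ih]
      simp [hC, eH, eM, eZ, eB]
    · have hfC : fC t = false := by simpa [fC] using h1
      have hH : fH t = true := by simpa [fH] using h2
      obtain ⟨eM, eZ, eB⟩ := excl_H t h2
      rw [show (PySem.Dict.mk [("Cassandra", a), ("HDFS", b), ("MAPREDUCE", c), ("ZooKeeper", d), ("HBase", e)]).modify "HDFS" [] (· ++ [t])
            = PySem.Dict.mk [("Cassandra", a), ("HDFS", b ++ [t]), ("MAPREDUCE", c), ("ZooKeeper", d), ("HBase", e)] from by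
          simp [PySem.Dict.modify, PySem.Dict.getD, PySem.Dict.get?_mk_cons, PySem.Dict.insert], ih]
      simp [hfC, hH, eM, eZ, eB]
    · have hfC : fC t = false := by simpa [fC] using h1
      have hfH : fH t = false := by simpa [fH] using h2
      have hM : fM t = true := by
        simp only [Bool.or_self] at h3
        simpa [fM] using h3
      obtain ⟨eZ, eB⟩ := excl_M t (by simpa [fM] using hM)
      rw [show (PySem.Dict.mk [("Cassandra", a), ("HDFS", b), ("MAPREDUCE", c), ("ZooKeeper", d), ("HBase", e)]).modify "MAPREDUCE" [] (· ++ [t])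
            = PySem.Dict.mk [("Cassandra", a), ("HDFS", b), ("MAPREDUCE", c ++ [t]), ("ZooKeeper", d), ("HBase", e)] from by
          simp [PySem.Dict.modify, PySem.Dict.getD, PySem.Dict.get?_mk_cons, PySem.Dict.insert], ih]
      simp [hfC, hfH, hM, eZ, eB]
    · have hfC : fC t = false := by simpa [fC] using h1
      have hfH : fH t = false := by simpa [fH] using h2
      have hfM : fM t = false := by
        simp only [Bool.or_self] at h3
        simpa [fM] using h3
      have hZ : fZ t = true := by simpa [fZ] using h4
      have eB := excl_Z t h4
      rw [show (PySem.Dict.mk [("Cassandra", a), ("HDFS", b), ("MAPREDUCE", c), ("ZooKeeper", d), ("HBase", e)]).modify "ZooKeeper" [] (· ++ [t])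
            = PySem.Dict.mk [("Cassandra", a), ("HDFS", b), ("MAPREDUCE", c), ("ZooKeeper", d ++ [t]), ("HBase", e)] from by
          simp [PySem.Dict.modify, PySem.Dict.getD, PySem.Dict.get?_mk_cons, PySem.Dict.insert], ih]
      simp [hfC, hfH, hfM, hZ, eB]
    · have hfC : fC t = false := by simpa [fC] using h1
      have hfH : fH t = false := by simpa [fH] using h2
      have hfM : fM t = false := by
        simp only [Bool.or_self] at h3
        simpa [fM] using h3
      have hfZ : fZ t = false := by simpa [fZ] using h4
      have hB : fB t = true := by simpa [fB] using h5
      rw [show (PySem.Dict.mk [("Cassandra", a), ("HDFS", b), ("MAPREDUCE", c), ("ZooKeeper", d), ("HBase", e)]).modify "HBase" [] (· ++ [t])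
            = PySem.Dict.mk [("Cassandra", a), ("HDFS", b), ("MAPREDUCE", c), ("ZooKeeper", d), ("HBase", e ++ [t])] from by
          simp [PySem.Dict.modify, PySem.Dict.getD, PySem.Dict.get?_mk_cons, PySem.Dict.insert], ih]
      simp [hfC, hfH, hfM, hfZ, hB]
    · have hfC : fC t = false := by simpa [fC] using h1
      have hfH : fH t = false := by simpa [fH] using h2
      have hfM : fM t = false := by
        simp only [Bool.or_self] at h3
        simpa [fM] using h3
      have hfZ : fZ t = false := by simpa [fZ] using h4
      have hfB : fB t = false := by simpa [fB] using h5
      rw [ih]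
      simp [hfC, hfH, hfM, hfZ, hfB]

-- ===== VERDICT (by name: the statement is the Claim_ definition above) =====
theorem classify_by_system_spec : Claim_equal_classify_by_system := by
  intro titles _
  show classify_by_system titles = classify_by_system_alt titles
  have h := classify_main titles [] [] [] [] []
  simp only [List.nil_append] at h
  unfold classify_by_system
  rw [show PySem.Dict.ofList [("Cassandra", ([] : List String)), ("HDFS", []), ("MAPREDUCE", []), ("ZooKeeper", []), ("HBase", [])]
        = PySem.Dict.mk [("Cassandra", ([] : List String)), ("HDFS", []), ("MAPREDUCE", []), ("ZooKeeper", []), ("HBase", [])] from by decide,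
      h]
  rfl
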